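-- pv_equiv track=rewrite | github.com/hann2a/baekjoon_hub | SWEA/Unrated/2383. ［모의 SW 역량테스트］ 점심 식사시간/［모의 SW 역량테스트］ 점심 식사시간.py | calculate_stair_time
-- ===== SOURCE A (Python) =====
-- def calculate_stair_time(stair_time, arrivals):
--     if not arrivals:
--         return 0
--
--     arrivals.sort()
--     in_use = []  # 현재 계단에 올라가 '내릴 때'의 완료시각들 (정렬 유지)
--
--     for t in arrivals:
--         # 도착한 시각 t 이전에 끝난 사람들 제거
--         in_use = [x for x in in_use if x > t]
--
--         if len(in_use) < 3:
--             # 자리가 있음: 바로 시작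
--             finish = t + stair_time
--         else:
--             # 자리가 없음: 가장 빨리 끝나는 사람의 완료시각 이후에 시작
--             earliest = in_use.pop(0)  # 정렬되어 있으니 앞이 최소
--             finish = earliest + stair_time
--
--         # 완료시각을 삽입 정렬로 넣어 정렬 유지
--         import bisect
--         bisect.insort(in_use, finish)
--
--     return in_use[-1]  # 마지막 사람이 끝나는 시각
-- ===== SOURCE B (Python) =====
-- def calculate_stair_time(stair_time, arrivals):
--     if not arrivals:
--         return 0
--     arrivals.sort()
--     window = []  # finish times of the 3 most recent starters, oldest first
--     for t in arrivals:
--         start = max(t, window.pop(0)) if len(window) == 3 else t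
--         window.append(start + stair_time)
--     return window[-1]
-- ===== Notes on version B (the rewrite author's own statement) =====
-- stated objective: simpler
-- what changed: Replaces A's time-pruned sorted active-set (per-step filter comprehension + pop(0) + bisect.insort) with a plain FIFO window of the last three finish times and the recurrence finish_i = max(t_i, finish_{i-3}) + stair_time; no pruning or sorted insertion is ever needed.
import Mathlib
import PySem

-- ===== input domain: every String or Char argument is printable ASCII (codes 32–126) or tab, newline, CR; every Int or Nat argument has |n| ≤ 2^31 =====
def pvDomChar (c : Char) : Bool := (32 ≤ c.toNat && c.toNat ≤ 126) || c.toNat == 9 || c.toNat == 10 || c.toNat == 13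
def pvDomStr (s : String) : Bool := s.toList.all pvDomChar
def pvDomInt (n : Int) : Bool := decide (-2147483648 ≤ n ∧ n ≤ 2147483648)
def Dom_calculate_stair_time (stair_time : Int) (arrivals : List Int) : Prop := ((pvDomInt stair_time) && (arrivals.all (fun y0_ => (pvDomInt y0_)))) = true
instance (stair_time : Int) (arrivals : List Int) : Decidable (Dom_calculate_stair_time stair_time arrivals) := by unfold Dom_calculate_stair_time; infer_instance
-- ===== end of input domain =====

-- B replaces A's time-pruned sorted active-set (filter + pop(0) + bisect.insort) with a plain FIFO
-- window of the last three finish times (simpler state, no pruning or sorted insertion).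
-- Both A and B sort `arrivals` in place; the equivalence proved here is about the return value.

-- ===== PORT A =====
-- bisect.insort(xs, v)  (insert at bisect_right position)
def pvInsort (xs : List Int) (v : Int) : List Int :=
  PySem.List.insert xs ((PySem.List.bisectRight xs v : Nat) : Int) v

-- one iteration of A's loop body over `in_use`
def pvStepA (st : Int) (in_use : List Int) (t : Int) : List Int :=
  let pruned := in_use.filter (fun x => decide (x > t))
  if pruned.length < 3 then
    pvInsort pruned (t + st)
  else
    match PySem.List.pop? pruned 0 with
    | some (e, rest) => pvInsort rest (e + st)
    | none => pvInsort pruned (t + st)   -- unreachable: here pruned has 3 elements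

def calculate_stair_time (stair_time : Int) (arrivals : List Int) : Int :=
  if arrivals = [] then 0
  else
    let s := PySem.List.sorted arrivals (fun x => x)
    let in_use := s.foldl (pvStepA stair_time) []
    match PySem.List.pyGet? in_use (-1) with   -- in_use[-1]
    | some v => v
    | none => 0   -- unreachable: the loop ran at least once, so in_use ≠ []

-- ===== PORT B =====
-- one iteration of B's loop body over `window`
def pvStepB (st : Int) (w : List Int) (t : Int) : List Int :=
  if w.length = 3 then
    match PySem.List.pop? w 0 with             -- window.pop(0)
    | some (e, rest) => rest ++ [max t e + st]
    | none => w ++ [t + st]                    -- unreachable: here w has 3 elements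
  else w ++ [t + st]

def calculate_stair_time_alt (stair_time : Int) (arrivals : List Int) : Int :=
  if arrivals = [] then 0
  else
    let s := PySem.List.sorted arrivals (fun x => x)
    let w := s.foldl (pvStepB stair_time) []
    match PySem.List.pyGet? w (-1) with        -- window[-1]
    | some v => v
    | none => 0   -- unreachable: the loop ran at least once, so window ≠ []

-- ===== PRECONDITION & SPEC =====
def Spec_calculate_stair_time (stair_time : Int) (arrivals : List Int) (out : Int) : Prop := out = calculate_stair_time_alt stair_time arrivals
instance (stair_time : Int) (arrivals : List Int) (out : Int) : Decidable (Spec_calculate_stair_time stair_time arrivals out) := by unfold Spec_calculate_stair_time; infer_instance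

-- ===== CLAIM (what is proved, stated in full; the proofs are below) =====
def Claim_equal_calculate_stair_time : Prop := ∀ (stair_time : Int) (arrivals : List Int), Dom_calculate_stair_time stair_time arrivals → Spec_calculate_stair_time stair_time arrivals (calculate_stair_time stair_time arrivals)

-- ===== LEMMAS AND PROOFS =====

-- Invariant relating A's state `u` (= in_use) to B's state `w` (= window) after processing a
-- nonempty prefix whose last arrival is `lastT`: w holds the finish times of the ≤ 3 most recent
-- starters (oldest first, nondecreasing), u is w minus the entries already expired at lastT
-- (except the newest, which A prunes only at the NEXT arrival), and the newest finish is bounded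
-- so that the next finish can never undercut it.
def pvInv (st lastT : Int) (u w : List Int) : Prop :=
  (∃ a, w = [a] ∧ u = [a] ∧ a ≤ lastT + st) ∨
  (∃ a b, w = [a, b] ∧ a ≤ b ∧
      u = [a].filter (fun x => decide (x > lastT)) ++ [b] ∧ b ≤ lastT + st) ∨
  (∃ a b c, w = [a, b, c] ∧ a ≤ b ∧ b ≤ c ∧
      u = [a, b].filter (fun x => decide (x > lastT)) ++ [c] ∧ c ≤ max lastT a + st)

lemma pvInsort_append (xs : List Int) (v : Int) (hs : xs.Pairwise (· ≤ ·))
    (hmax : ∀ x ∈ xs, x ≤ v) : pvInsort xs v = xs ++ [v] := by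
  have hspec := PySem.List.bisectRight_spec xs v hs
  have hlen : PySem.List.bisectRight xs v = xs.length := by
    rcases hspec with ⟨h1, _, h3⟩
    by_contra hne
    have hlt : PySem.List.bisectRight xs v < xs.length := lt_of_le_of_ne h1 hne
    have := h3 (PySem.List.bisectRight xs v) hlt le_rfl
    exact absurd (hmax _ (List.getElem_mem hlt)) (not_le.mpr this)
  rw [pvInsort, hlen, PySem.List.insert_natCast xs xs.length v le_rfl]
  simp

lemma pvFilter_filter (lastT t : Int) (hle : lastT ≤ t) (l : List Int) :
    (l.filter (fun x => decide (x > lastT))).filter (fun x => decide (x > t)) =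
      l.filter (fun x => decide (x > t)) := by
  rw [List.filter_filter]
  apply List.filter_congr
  intro x _
  by_cases h : x > t
  · simp [h, lt_of_le_of_lt hle h]
  · simp [h]

lemma pvInv_step (st lastT t : Int) (u w : List Int) (hle : lastT ≤ t)
    (h : pvInv st lastT u w) : pvInv st t (pvStepA st u t) (pvStepB st w t) := by
  rcases h with ⟨a, hw, hu, hb⟩ | ⟨a, b, hw, hab, hu, hb⟩ | ⟨a, b, c, hw, hab, hbc, hu, hb⟩
  · -- w = [a]
    subst hw hu
    have hfin : a ≤ t + st := le_trans hb (by omega)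
    have hA : pvStepA st [a] t = [a].filter (fun x => decide (x > t)) ++ [t + st] := by
      have hlen : ([a].filter (fun x => decide (x > t))).length < 3 := by
        have := List.length_filter_le (fun x => decide (x > t)) [a]
        simp only [List.length_cons, List.length_nil] at this; omega
      simp only [pvStepA, if_pos hlen]
      apply pvInsort_append
      · exact List.Pairwise.filter _ (by simp)
      · intro x hx
        have := List.mem_filter.mp hx
        simp at this
        omega
    rw [hA]
    refine Or.inr (Or.inl ⟨a, t + st, ?_, hfin, rfl, le_refl _⟩)
    simp [pvStepB]
  · -- w = [a, b]
    subst hw hu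
    have hbt : b ≤ t + st := le_trans hb (by omega)
    have hat : a ≤ t + st := le_trans hab hbt
    have hprune : (([a].filter (fun x => decide (x > lastT)) ++ [b]).filter
        (fun x => decide (x > t))) = [a, b].filter (fun x => decide (x > t)) := by
      rw [List.filter_append, pvFilter_filter lastT t hle]
      show _ = ([a] ++ [b]).filter _
      rw [List.filter_append]
    have hA : pvStepA st ([a].filter (fun x => decide (x > lastT)) ++ [b]) t =
        [a, b].filter (fun x => decide (x > t)) ++ [t + st] := by
      have hlen : ([a, b].filter (fun x => decide (x > t))).length < 3 := by
        have := List.length_filter_le (fun x => decide (x > t)) [a, b]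
        simp only [List.length_cons, List.length_nil] at this; omega
      simp only [pvStepA, hprune, if_pos hlen]
      apply pvInsort_append
      · exact List.Pairwise.filter _ (by simp [hab])
      · intro x hx
        have := List.mem_filter.mp hx
        simp at this
        rcases this.1 with h | h <;> omega
    rw [hA]
    refine Or.inr (Or.inr ⟨a, b, t + st, ?_, hab, hbt, rfl, by simp⟩)
    simp [pvStepB]
  · -- w = [a, b, c]
    subst hw hu
    have hprune : (([a, b].filter (fun x => decide (x > lastT)) ++ [c]).filter
        (fun x => decide (x > t))) = [a, b, c].filter (fun x => decide (x > t)) := by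
      rw [List.filter_append, pvFilter_filter lastT t hle]
      show _ = ([a, b] ++ [c]).filter _
      rw [List.filter_append]
    by_cases hta : a > t
    · -- all three still on the stairs: A pops a, B dequeues a; finish = a + st
      have htb : b > t := lt_of_lt_of_le hta hab
      have htc : c > t := lt_of_lt_of_le htb hbc
      have hmaxa : max lastT a = a := max_eq_right (le_trans hle (le_of_lt hta))
      have hca : c ≤ a + st := by rw [hmaxa] at hb; exact hb
      have hfilter : [a, b, c].filter (fun x => decide (x > t)) = [a, b, c] := by
        simp [hta, htb, htc]
      have hA : pvStepA st ([a, b].filter (fun x => decide (x > lastT)) ++ [c]) t =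
          [b, c] ++ [a + st] := by
        simp only [pvStepA, hprune, hfilter]
        rw [if_neg (by simp), PySem.List.pop?_zero_cons]
        apply pvInsort_append
        · simp [hbc]
        · intro x hx
          simp at hx
          rcases hx with h | h <;> omega
      rw [hA]
      refine Or.inr (Or.inr ⟨b, c, a + st, ?_, hbc, hca, by simp [htb, htc], by
        have : b ≤ max t b := le_max_right _ _
        omega⟩)
      simp only [pvStepB, List.length_cons, List.length_nil]
      rw [if_pos trivial, PySem.List.pop?_zero_cons]
      simp [max_eq_right (le_of_lt hta)]
    · -- a already finished (a ≤ t): at most two survive; finish = t + st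
      rw [not_lt] at hta
      have hct : c ≤ t + st := le_trans hb (by
        have : max lastT a ≤ t := max_le hle hta
        omega)
      have hbt : b ≤ t + st := le_trans hbc hct
      have hfa : [a, b, c].filter (fun x => decide (x > t)) =
          [b, c].filter (fun x => decide (x > t)) := by
        show ([a] ++ [b, c]).filter _ = _
        rw [List.filter_append]
        simp [not_lt.mpr hta]
      have hA : pvStepA st ([a, b].filter (fun x => decide (x > lastT)) ++ [c]) t =
          [b, c].filter (fun x => decide (x > t)) ++ [t + st] := by
        have hlen : ([b, c].filter (fun x => decide (x > t))).length < 3 := by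
          have := List.length_filter_le (fun x => decide (x > t)) [b, c]
          simp only [List.length_cons, List.length_nil] at this; omega
        simp only [pvStepA, hprune, hfa, if_pos hlen]
        apply pvInsort_append
        · exact List.Pairwise.filter _ (by simp [hbc])
        · intro x hx
          have := List.mem_filter.mp hx
          simp at this
          rcases this.1 with h | h <;> omega
      rw [hA]
      refine Or.inr (Or.inr ⟨b, c, t + st, ?_, hbc, hct, rfl, by
        have : t ≤ max t b := le_max_left _ _
        omega⟩)
      simp only [pvStepB, List.length_cons, List.length_nil]
      rw [if_pos trivial, PySem.List.pop?_zero_cons]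
      simp [max_eq_left hta]

lemma pvInv_fold (st : Int) (ts : List Int) : ∀ (lastT : Int) (u w : List Int),
    (lastT :: ts).Pairwise (· ≤ ·) → pvInv st lastT u w →
    ∃ L, pvInv st L (ts.foldl (pvStepA st) u) (ts.foldl (pvStepB st) w) := by
  induction ts with
  | nil => exact fun lastT u w _ h => ⟨lastT, h⟩
  | cons t rest ih =>
    intro lastT u w hpw h
    rcases List.pairwise_cons.mp hpw with ⟨hfst, hrest⟩
    exact ih t _ _ hrest (pvInv_step st lastT t u w (hfst t (by simp)) h)

lemma pvInv_getLast (st L : Int) (u w : List Int) (h : pvInv st L u w) :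
    PySem.List.pyGet? u (-1) = PySem.List.pyGet? w (-1) ∧ w ≠ [] := by
  rw [PySem.List.pyGet?_neg_one, PySem.List.pyGet?_neg_one]
  rcases h with ⟨a, hw, hu, _⟩ | ⟨a, b, hw, _, hu, _⟩ | ⟨a, b, c, hw, _, _, hu, _⟩ <;>
    subst hw hu <;> simp

lemma pvFirst_step (st t : Int) :
    pvStepA st [] t = [t + st] ∧ pvStepB st [] t = [t + st] := by
  constructor
  · simp only [pvStepA, List.filter_nil]
    rw [if_pos (by simp)]
    rw [pvInsort_append [] (t + st) (by simp) (by simp)]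
    rfl
  · simp [pvStepB]

-- ===== VERDICT (by name: the statement is the Claim_ definition above) =====
theorem calculate_stair_time_spec : Claim_equal_calculate_stair_time := by
  intro st arrivals _
  unfold Spec_calculate_stair_time calculate_stair_time calculate_stair_time_alt
  by_cases hnil : arrivals = []
  · simp [hnil]
  · rw [if_neg hnil, if_neg hnil]
    have hslen : PySem.List.sorted arrivals (fun x => x) ≠ [] := by
      intro hs
      have := PySem.List.sorted_perm arrivals (fun x => x) false
      rw [hs] at this
      exact hnil (List.Perm.nil_eq this).symm
    obtain ⟨t0, rest, hs⟩ := List.exists_cons_of_ne_nil hslen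
    have hpw : (PySem.List.sorted arrivals (fun x => x)).Pairwise (fun a b => a ≤ b) :=
      PySem.List.sorted_pairwise arrivals (fun x => x)
    rw [hs] at hpw
    rw [hs]
    simp only [List.foldl_cons]
    rw [(pvFirst_step st t0).1, (pvFirst_step st t0).2]
    have hinv0 : pvInv st t0 [t0 + st] [t0 + st] := Or.inl ⟨t0 + st, rfl, rfl, le_refl _⟩
    obtain ⟨L, hinv⟩ := pvInv_fold st rest t0 _ _ hpw hinv0
    obtain ⟨heq, hne⟩ := pvInv_getLast st L _ _ hinv
    rw [heq]
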